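-- pv_equiv track=rewrite | github.com/boarderframe/BoarderframeOS | mcp_servers/src/app/services/llm_artifact_formatter.py | _shorten_class_names
-- ===== SOURCE A (Python) =====
-- def _shorten_class_names(html: str) -> str:
--     """Shorten CSS class names for token efficiency"""
--     replacements = {
--         "product-card": "pc",
--         "product-grid": "pg",
--         "product-list": "pl",
--         "price": "pr",
--         "description": "d",
--         "button": "b",
--         "container": "c",
--         "wrapper": "w",
--         "header": "h",
--         "footer": "f"
--     }
--
--     for long_name, short_name in replacements.items():
--         html = html.replace(f'class="{long_name}"', f'class="{short_name}"')
--         html = html.replace(f"class='{long_name}'", f"class='{short_name}'")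
--
--     return html
-- ===== SOURCE B (Python) =====
-- def _shorten_class_names(html: str) -> str:
--     """Shorten CSS class names for token efficiency"""
--     replacements = {
--         "product-card": "pc",
--         "product-grid": "pg",
--         "product-list": "pl",
--         "price": "pr",
--         "description": "d",
--         "button": "b",
--         "container": "c",
--         "wrapper": "w",
--         "header": "h",
--         "footer": "f"
--     }
--
--     # one table mapping each quoted attribute to its shortened form ...
--     table = {"class=" + q + long + q: "class=" + q + short + q
--              for long, short in replacements.items() for q in ('"', "'")}
--
--     # ... then a single left-to-right scan over the html
--     out = []
--     i = 0
--     n = len(html)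
--     while i < n:
--         for target, repl in table.items():
--             if html.startswith(target, i):
--                 out.append(repl)
--                 i += len(target)
--                 break
--         else:
--             out.append(html[i])
--             i += 1
--     return "".join(out)
-- ===== Notes on version B (the rewrite author's own statement) =====
-- stated objective: alternative
-- what changed: Replaces the 10-iteration loop of 20 global str.replace passes with one table of the 20 quoted targets and a single left-to-right scan of the html that emits the replacement wherever a target starts and the character otherwise.
import Mathlib
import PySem

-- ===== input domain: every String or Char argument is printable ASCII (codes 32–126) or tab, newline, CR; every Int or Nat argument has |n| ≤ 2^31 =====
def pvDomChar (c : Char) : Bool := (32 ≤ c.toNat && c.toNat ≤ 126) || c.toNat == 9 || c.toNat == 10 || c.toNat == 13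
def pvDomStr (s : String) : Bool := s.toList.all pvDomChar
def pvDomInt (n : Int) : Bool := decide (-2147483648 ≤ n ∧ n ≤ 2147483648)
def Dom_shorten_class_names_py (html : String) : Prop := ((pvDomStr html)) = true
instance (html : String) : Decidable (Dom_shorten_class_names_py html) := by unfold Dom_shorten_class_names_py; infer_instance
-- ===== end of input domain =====

-- B replaces A's 10-iteration loop of 20 global str.replace passes by one target table and a
-- single left-to-right scan of the html (objective: alternative single-pass algorithm, same results).


-- ===== PORT A =====
def shorten_class_names_py (html : String) : String :=
  let replacements : List (String × String) :=
    [("product-card", "pc"), ("product-grid", "pg"), ("product-list", "pl"),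
     ("price", "pr"), ("description", "d"), ("button", "b"), ("container", "c"),
     ("wrapper", "w"), ("header", "h"), ("footer", "f")]
  replacements.foldl (fun h p =>
    let h1 := PySem.Str.replace h ("class=\"" ++ p.1 ++ "\"") ("class=\"" ++ p.2 ++ "\"")
    PySem.Str.replace h1 ("class='" ++ p.1 ++ "'") ("class='" ++ p.2 ++ "'")) html

-- ===== PORT B =====
-- the table Source B builds: the 20 quoted targets, in dict-insertion order, with their replacements
def pvTableB : List (String × String) :=
  let replacements : List (String × String) :=
    [("product-card", "pc"), ("product-grid", "pg"), ("product-list", "pl"),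
     ("price", "pr"), ("description", "d"), ("button", "b"), ("container", "c"),
     ("wrapper", "w"), ("header", "h"), ("footer", "f")]
  replacements.flatMap (fun p =>
    ["\"", "'"].map (fun q =>
      ("class=" ++ q ++ p.1 ++ q, "class=" ++ q ++ p.2 ++ q)))

def pvRulesL : List (List Char × List Char) := pvTableB.map (fun p => (p.1.toList, p.2.toList))

-- Source B's while loop: at each position emit the replacement of the first matching target (and skip
-- it) or the current character
def scanGo : List Char → List Char
  | [] => []
  | c :: u =>
    match h : pvRulesL.find? (fun p => p.1.isPrefixOf (c :: u)) with
    | some (t, r) => r ++ scanGo ((c :: u).drop t.length)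
    | none => c :: scanGo u
termination_by l => l.length
decreasing_by
  · have hm : (t, r) ∈ pvRulesL := List.mem_of_find?_eq_some h
    have h1 : ∀ p ∈ pvRulesL, 1 ≤ p.1.length := by decide
    have h2 : 1 ≤ t.length := h1 _ hm
    simp only [List.length_drop, List.length_cons]
    omega
  · simp

def shorten_class_names_py_alt (html : String) : String :=
  String.ofList (scanGo html.toList)

-- ===== PRECONDITION & SPEC =====
def Spec_shorten_class_names_py (html : String) (out : String) : Prop := out = shorten_class_names_py_alt html
instance (html : String) (out : String) : Decidable (Spec_shorten_class_names_py html out) := by unfold Spec_shorten_class_names_py; infer_instance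

-- ===== CLAIM (what is proved, stated in full; the proofs are below) =====
def Claim_equal_shorten_class_names_py : Prop := ∀ (html : String), Dom_shorten_class_names_py html → Spec_shorten_class_names_py html (shorten_class_names_py html)

-- ===== LEMMAS AND PROOFS =====

-- single-rule replacement as a plain scan (the shape of Python's str.replace for a nonempty needle)
def rep1 (o : Char) (os r : List Char) : List Char → List Char
  | [] => []
  | c :: u =>
    if (o :: os).isPrefixOf (c :: u) then r ++ rep1 o os r (u.drop os.length)
    else c :: rep1 o os r u
termination_by l => l.length
decreasing_by
  · simp only [List.length_drop, List.length_cons]; omega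
  · simp

-- A's sequence of replace passes, over a rule list
def listRep (L : List (List Char × List Char)) (s : List Char) : List Char :=
  L.foldl (fun s p => PySem.Chars.replace s p.1 p.2) s

-- "the needle t never occurs starting inside x, and x is not a strict prefix of t"
abbrev inert (t x : List Char) : Prop :=
  ∀ k, k < x.length → ¬ (x.drop k <+: t) ∧ ¬ (t <+: x.drop k)

-- "the replacement r never overlaps t' across a position > 0"
abbrev rInert (r t' : List Char) : Prop :=
  ∀ k, k < t'.length → 0 < k → ¬ (t'.drop k <+: r) ∧ ¬ (r <+: t'.drop k)

theorem sc_nil : ∀ p ∈ pvRulesL, p.1 ≠ [] := by decide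
theorem sc_nodup : pvRulesL.Nodup := by decide
theorem sc1 : ∀ p ∈ pvRulesL, ∀ q ∈ pvRulesL, p ≠ q → inert p.1 q.1 := by decide
theorem sc2 : ∀ p ∈ pvRulesL, ∀ q ∈ pvRulesL, inert p.1 q.2 := by decide
theorem sc3 : ∀ p ∈ pvRulesL, ∀ q ∈ pvRulesL, rInert p.2 q.1 := by decide

theorem rep1_nil (o : Char) (os r : List Char) : rep1 o os r [] = [] := by
  rw [rep1]

theorem rep1_cons (o : Char) (os r : List Char) (c : Char) (u : List Char) :
    rep1 o os r (c :: u) =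
      if (o :: os).isPrefixOf (c :: u) then r ++ rep1 o os r (u.drop os.length)
      else c :: rep1 o os r u := by
  rw [rep1]

theorem go_eq_rep1 (o : Char) (os r : List Char) :
    ∀ (fuel : Nat) (l acc : List Char), l.length ≤ fuel →
      PySem.Chars.replace.go (o :: os) r fuel l acc = acc.reverse ++ rep1 o os r l := by
  intro fuel
  induction fuel with
  | zero =>
    intro l acc h
    have hl : l = [] := by cases l <;> simp_all
    subst hl
    simp [PySem.Chars.replace.go, rep1_nil]
  | succ n ih =>
    intro l acc h
    cases l with
    | nil => simp [PySem.Chars.replace.go, rep1_nil]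
    | cons c u =>
      rw [PySem.Chars.replace.go, rep1_cons]
      by_cases hp : (o :: os).isPrefixOf (c :: u) = true
      · rw [if_pos hp, if_pos hp]
        have hd : (c :: u).drop (o :: os).length = u.drop os.length := by
          simp [List.drop_succ_cons]
        rw [hd, ih (u.drop os.length) (r.reverse ++ acc) (by simp only [List.length_drop]; simp only [List.length_cons] at h; omega)]
        simp
      · rw [if_neg hp, if_neg hp]
        rw [ih u (c :: acc) (by simp only [List.length_cons] at h; omega)]
        simp

theorem replace_eq_rep1 (o : Char) (os r s : List Char) :
    PySem.Chars.replace s (o :: os) r = rep1 o os r s := by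
  rw [PySem.Chars.replace]
  simp only [List.isEmpty_cons, if_false, Bool.false_eq_true]
  simpa using go_eq_rep1 o os r s.length s [] le_rfl

theorem prefix_left_of_prefix_append {t x v : List Char} (h : t <+: x ++ v)
    (hle : t.length ≤ x.length) : t <+: x :=
  (List.isPrefix_append_of_length hle).mp h

theorem prefix_rev_of_prefix_append {t x v : List Char} (h : t <+: x ++ v)
    (hle : x.length ≤ t.length) : x <+: t := by
  obtain ⟨w, hw⟩ := h
  have hx : x = t.take x.length := by
    have := congrArg (List.take x.length) hw
    simpa [List.take_append_of_le_length hle, List.take_left] using this.symm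
  rw [hx]; exact List.take_prefix _ _

theorem rep1_append_inert (o : Char) (os r : List Char) :
    ∀ (x v : List Char), inert (o :: os) x → rep1 o os r (x ++ v) = x ++ rep1 o os r v := by
  intro x
  induction x with
  | nil => intro v _; simp
  | cons c x' ih =>
    intro v hin
    have hnp : ¬ (o :: os).isPrefixOf (c :: (x' ++ v)) = true := by
      rw [List.isPrefixOf_iff_prefix]
      intro hpre
      have h0 := hin 0 (by simp)
      have hpre' : (o :: os) <+: (c :: x') ++ v := by simpa using hpre
      rcases le_or_gt (o :: os).length (c :: x').length with hle | hlt
      · exact h0.2 (by simpa using prefix_left_of_prefix_append hpre' hle)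
      · exact h0.1 (by simpa using prefix_rev_of_prefix_append hpre' (by omega))
    have hsh : inert (o :: os) x' := by
      intro k hk
      simpa using hin (k + 1) (by simp; omega)
    calc rep1 o os r ((c :: x') ++ v) = rep1 o os r (c :: (x' ++ v)) := by simp
      _ = c :: rep1 o os r (x' ++ v) := by rw [rep1_cons, if_neg hnp]
      _ = c :: (x' ++ rep1 o os r v) := by rw [ih v hsh]
      _ = (c :: x') ++ rep1 o os r v := by simp

theorem rep1_head_match (o : Char) (os r v : List Char) :
    rep1 o os r ((o :: os) ++ v) = r ++ rep1 o os r v := by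
  have : (o :: os) ++ v = o :: (os ++ v) := by simp
  rw [this, rep1_cons, if_pos (by rw [List.isPrefixOf_iff_prefix]; exact ⟨v, by simp⟩),
    List.drop_left]

theorem rep1_decomp (o : Char) (os r : List Char) : ∀ (l : List Char),
    rep1 o os r l = l ∨
      ∃ p X, p ≤ l.length ∧ (o :: os) <+: l.drop p ∧
        rep1 o os r l = l.take p ++ r ++ X := by
  intro l
  induction l using rep1.induct o os with
  | case1 => left; exact rep1_nil o os r
  | case2 c u hp ih =>
    right
    exact ⟨0, rep1 o os r (u.drop os.length), by simp, by
      simpa using List.isPrefixOf_iff_prefix.mp hp, by rw [rep1_cons, if_pos hp]; simp⟩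
  | case3 c u hp ih =>
    rcases ih with heq | ⟨p, X, hple, hpre, heq⟩
    · left; rw [rep1_cons, if_neg hp, heq]
    · right
      exact ⟨p + 1, X, by simp; omega, by simpa using hpre, by
        rw [rep1_cons, if_neg hp, heq]; simp⟩

theorem no_create (o : Char) (os r t' l : List Char) (hl : ¬ (o :: os) <+: l)
    (hl' : ¬ t' <+: l) (hri : rInert r t') : ¬ t' <+: rep1 o os r l := by
  rcases rep1_decomp o os r l with heq | ⟨p, X, hple, hpre, heq⟩
  · rw [heq]; exact hl'
  · have hp0 : 0 < p := by
      rcases Nat.eq_zero_or_pos p with h0 | h0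
      · subst h0; simp at hpre; exact absurd hpre hl
      · exact h0
    rw [heq]
    intro hbad
    have hlen : (l.take p).length = p := by simp; omega
    rcases le_or_gt t'.length p with hle | hgt
    · -- t' lies inside the untouched prefix of l
      have h1 : t' <+: l.take p := by
        apply prefix_left_of_prefix_append (v := r ++ X) _ (by omega)
        simpa using hbad
      exact hl' (h1.trans (List.take_prefix _ _))
    · -- t' crosses into the inserted replacement r
      have h2 : l.take p <+: t' := by
        apply prefix_rev_of_prefix_append (v := r ++ X) _ (by omega)
        simpa using hbad
      have h3 : t'.drop p <+: r ++ X := by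
        have ht' : t' = l.take p ++ t'.drop p := by
          obtain ⟨w, hw⟩ := h2
          have htake : t'.take p = l.take p := by
            rw [← hw, List.take_left' hlen]
          rw [← htake, List.take_append_drop]
        have hbad' : l.take p ++ t'.drop p <+: l.take p ++ (r ++ X) := by
          rw [← ht']; simpa using hbad
        exact (List.prefix_append_right_inj _).mp hbad'
      have hk := hri p (by
        have := hbad.length_le
        simp [hlen] at this ⊢
        omega) hp0
      rcases le_or_gt (t'.drop p).length r.length with hle2 | hgt2
      · exact hk.1 (prefix_left_of_prefix_append h3 hle2)
      · exact hk.2 (prefix_rev_of_prefix_append h3 (by omega))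

theorem listRep_nil (L : List (List Char × List Char)) (hnil : ∀ p ∈ L, p.1 ≠ []) :
    listRep L [] = [] := by
  induction L with
  | nil => rfl
  | cons p L ih =>
    obtain ⟨o, os, h1⟩ : ∃ o os, p.1 = o :: os := by
      cases hp : p.1 with
      | nil => exact absurd hp (hnil p (by simp))
      | cons a b => exact ⟨a, b, rfl⟩
    show listRep L (PySem.Chars.replace [] p.1 p.2) = []
    rw [h1, replace_eq_rep1, rep1_nil]
    exact ih (fun q hq => hnil q (by simp [hq]))

theorem listRep_append (L : List (List Char × List Char)) (x : List Char)
    (hnil : ∀ p ∈ L, p.1 ≠ []) (hin : ∀ p ∈ L, inert p.1 x) :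
    ∀ v, listRep L (x ++ v) = x ++ listRep L v := by
  induction L with
  | nil => intro v; rfl
  | cons p L ih =>
    intro v
    obtain ⟨o, os, h1⟩ : ∃ o os, p.1 = o :: os := by
      cases hp : p.1 with
      | nil => exact absurd hp (hnil p (by simp))
      | cons a b => exact ⟨a, b, rfl⟩
    have hx : PySem.Chars.replace (x ++ v) p.1 p.2 = x ++ PySem.Chars.replace v p.1 p.2 := by
      rw [h1, replace_eq_rep1, replace_eq_rep1,
        rep1_append_inert o os p.2 x v (h1 ▸ hin p (by simp))]
    show listRep L (PySem.Chars.replace (x ++ v) p.1 p.2)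
        = x ++ listRep L (PySem.Chars.replace v p.1 p.2)
    rw [hx]
    exact ih (fun q hq => hnil q (by simp [hq])) (fun q hq => hin q (by simp [hq]))
      (PySem.Chars.replace v p.1 p.2)

theorem listRep_cons (L : List (List Char × List Char))
    (hnil : ∀ p ∈ L, p.1 ≠ []) (hR : ∀ p ∈ L, ∀ q ∈ L, rInert p.2 q.1) :
    ∀ (c : Char) (u : List Char), (∀ p ∈ L, ¬ p.1 <+: (c :: u)) →
      listRep L (c :: u) = c :: listRep L u := by
  induction L with
  | nil => intro c u _; rfl
  | cons p L ih =>
    intro c u hAll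
    obtain ⟨o, os, h1⟩ : ∃ o os, p.1 = o :: os := by
      cases hp : p.1 with
      | nil => exact absurd hp (hnil p (by simp))
      | cons a b => exact ⟨a, b, rfl⟩
    have hhead : ¬ (o :: os).isPrefixOf (c :: u) = true := by
      rw [List.isPrefixOf_iff_prefix, ← h1]
      exact hAll p (by simp)
    have hstep : PySem.Chars.replace (c :: u) p.1 p.2 = c :: rep1 o os p.2 u := by
      rw [h1, replace_eq_rep1, rep1_cons, if_neg hhead]
    have hnil' : ∀ q ∈ L, q.1 ≠ [] := fun q hq => hnil q (by simp [hq])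
    have hR' : ∀ q ∈ L, ∀ q' ∈ L, rInert q.2 q'.1 :=
      fun q hq q' hq' => hR q (by simp [hq]) q' (by simp [hq'])
    have hstep' : rep1 o os p.2 (c :: u) = c :: rep1 o os p.2 u := by
      rw [rep1_cons, if_neg hhead]
    have hAll' : ∀ q ∈ L, ¬ q.1 <+: (c :: rep1 o os p.2 u) := by
      intro q hq
      rw [← hstep']
      exact no_create o os p.2 q.1 (c :: u) (h1 ▸ hAll p (by simp)) (hAll q (by simp [hq]))
        (hR p (by simp) q (by simp [hq]))
    show listRep L (PySem.Chars.replace (c :: u) p.1 p.2)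
        = c :: listRep L (PySem.Chars.replace u p.1 p.2)
    rw [hstep, ih hnil' hR' c (rep1 o os p.2 u) hAll', h1, replace_eq_rep1]

theorem scanGo_nil : scanGo [] = [] := by rw [scanGo]

theorem scanGo_some (c : Char) (u t r : List Char)
    (h : pvRulesL.find? (fun p => p.1.isPrefixOf (c :: u)) = some (t, r)) :
    scanGo (c :: u) = r ++ scanGo ((c :: u).drop t.length) := by
  rw [scanGo]
  split
  · rename_i t' r' h'
    rw [h] at h'; injection h' with h2; cases h2; rfl
  · rename_i h'
    rw [h] at h'; cases h'

theorem scanGo_none (c : Char) (u : List Char)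
    (h : pvRulesL.find? (fun p => p.1.isPrefixOf (c :: u)) = none) :
    scanGo (c :: u) = c :: scanGo u := by
  rw [scanGo]
  split
  · rename_i t' r' h'; rw [h] at h'; cases h'
  · rfl

theorem main_eq : ∀ (n : Nat) (l : List Char), l.length ≤ n → listRep pvRulesL l = scanGo l := by
  intro n
  induction n with
  | zero =>
    intro l h
    have hl : l = [] := by cases l <;> simp_all
    subst hl
    rw [listRep_nil _ sc_nil, scanGo_nil]
  | succ n ih =>
    intro l hlen
    cases l with
    | nil => rw [listRep_nil _ sc_nil, scanGo_nil]
    | cons c u =>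
      cases hfind : pvRulesL.find? (fun p => p.1.isPrefixOf (c :: u)) with
      | some pr =>
        obtain ⟨t, r⟩ := pr
        have hmem : (t, r) ∈ pvRulesL := List.mem_of_find?_eq_some hfind
        obtain ⟨hpt, L1, L2, hsplit, -⟩ := List.find?_eq_some_iff_append.mp hfind
        have hpre : t <+: (c :: u) := List.isPrefixOf_iff_prefix.mp hpt
        obtain ⟨v, hv⟩ := hpre
        obtain ⟨o, os, hto⟩ : ∃ o os, t = o :: os := by
          cases ht : t with
          | nil => exact absurd ht (sc_nil (t, r) hmem)
          | cons a b => exact ⟨a, b, rfl⟩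
        have hnd : (L1 ++ (t, r) :: L2).Nodup := hsplit ▸ sc_nodup
        have hnotL1 : (t, r) ∉ L1 := fun hmem1 =>
          (List.disjoint_of_nodup_append hnd) hmem1 (by simp)
        have hsub1 : ∀ q ∈ L1, q ∈ pvRulesL := fun q hq => by
          rw [hsplit]; exact List.mem_append_left _ hq
        have hsub2 : ∀ q ∈ L2, q ∈ pvRulesL := fun q hq => by
          rw [hsplit]; exact List.mem_append_right _ (by simp [hq])
        have hin1 : ∀ q ∈ L1, inert q.1 t := fun q hq =>
          sc1 q (hsub1 q hq) (t, r) hmem (fun he => hnotL1 (he ▸ hq))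
        have hin2 : ∀ q ∈ L2, inert q.1 r := fun q hq => sc2 q (hsub2 q hq) (t, r) hmem
        have hnil1 : ∀ q ∈ L1, q.1 ≠ [] := fun q hq => sc_nil q (hsub1 q hq)
        have hnil2 : ∀ q ∈ L2, q.1 ≠ [] := fun q hq => sc_nil q (hsub2 q hq)
        have hlsplit : ∀ s, listRep pvRulesL s
            = listRep L2 (PySem.Chars.replace (listRep L1 s) t r) := by
          intro s
          rw [hsplit]
          simp only [listRep, List.foldl_append, List.foldl_cons]
        have hdrop : (c :: u).drop t.length = v := by rw [← hv, List.drop_left]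
        have hIH : listRep pvRulesL v = scanGo v := by
          apply ih
          have h1 : t.length + v.length = u.length + 1 := by
            have := congrArg List.length hv
            simpa using this
          have h2 : 1 ≤ t.length := by rw [hto]; simp
          simp only [List.length_cons] at hlen
          omega
        calc listRep pvRulesL (c :: u)
            = listRep L2 (PySem.Chars.replace (listRep L1 (t ++ v)) t r) := by
              rw [hlsplit, hv]
          _ = listRep L2 (PySem.Chars.replace (t ++ listRep L1 v) t r) := by
              rw [listRep_append L1 t hnil1 hin1 v]
          _ = listRep L2 (r ++ PySem.Chars.replace (listRep L1 v) t r) := by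
              rw [hto, replace_eq_rep1, replace_eq_rep1, rep1_head_match]
          _ = r ++ listRep L2 (PySem.Chars.replace (listRep L1 v) t r) := by
              rw [listRep_append L2 r hnil2 hin2]
          _ = r ++ listRep pvRulesL v := by rw [← hlsplit]
          _ = r ++ scanGo v := by rw [hIH]
          _ = scanGo (c :: u) := by rw [scanGo_some c u t r hfind, hdrop]
      | none =>
        have hAll : ∀ p ∈ pvRulesL, ¬ p.1 <+: (c :: u) := by
          intro p hp hc
          exact (List.find?_eq_none.mp hfind p hp) (List.isPrefixOf_iff_prefix.mpr hc)
        rw [listRep_cons pvRulesL sc_nil sc3 c u hAll, scanGo_none c u hfind,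
          ih u (by simp only [List.length_cons] at hlen; omega)]

theorem bridgeA (html : String) :
    (shorten_class_names_py html).toList = listRep pvRulesL html.toList := by
  simp [shorten_class_names_py, listRep, pvRulesL, pvTableB, PySem.Str.toList_replace]

-- ===== VERDICT (by name: the statement is the Claim_ definition above) =====
theorem shorten_class_names_py_spec : Claim_equal_shorten_class_names_py := by
  intro html _
  unfold Spec_shorten_class_names_py shorten_class_names_py_alt
  have h1 : (shorten_class_names_py html).toList = scanGo html.toList :=
    (bridgeA html).trans (main_eq html.toList.length html.toList le_rfl)
  rw [← h1, String.ofList_toList]
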